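-- pv_equiv track=rewrite | github.com/akirbaes/RollingPolyhedron | ScreenspaceRoller.py | get_unused_faces
-- ===== SOURCE A (Python) =====
-- def get_unused_faces(result, poly, polyname):
--     faces = set(poly.keys())
--     # for face in poly:
--     #     for ori in range(len(poly[face])):
--     #         faces.add(canon_fo(polyname,face,ori)[0])
--     for res in result.values():
--         for face, orientation in res:
--             # try:faces.remove(canon_fo(polyname,face,orientation)[0])
--             try:
--                 faces.remove(face)
--             except:
--                 pass
--         if not faces:
--             return faces
--     return faces
-- ===== SOURCE B (Python) =====
-- def get_unused_faces(result, poly, polyname):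
--     used = set()
--     for res in result.values():
--         for face, orientation in res:
--             used.add(face)
--     return set(poly.keys()) - used
-- ===== Notes on version B (the rewrite author's own statement) =====
-- stated objective: simpler
-- what changed: B collects one 'used' set from all result entries and returns a single bulk set difference set(poly.keys()) - used, instead of A's incremental try/except removal from the key set with an early exit.
import Mathlib
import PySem

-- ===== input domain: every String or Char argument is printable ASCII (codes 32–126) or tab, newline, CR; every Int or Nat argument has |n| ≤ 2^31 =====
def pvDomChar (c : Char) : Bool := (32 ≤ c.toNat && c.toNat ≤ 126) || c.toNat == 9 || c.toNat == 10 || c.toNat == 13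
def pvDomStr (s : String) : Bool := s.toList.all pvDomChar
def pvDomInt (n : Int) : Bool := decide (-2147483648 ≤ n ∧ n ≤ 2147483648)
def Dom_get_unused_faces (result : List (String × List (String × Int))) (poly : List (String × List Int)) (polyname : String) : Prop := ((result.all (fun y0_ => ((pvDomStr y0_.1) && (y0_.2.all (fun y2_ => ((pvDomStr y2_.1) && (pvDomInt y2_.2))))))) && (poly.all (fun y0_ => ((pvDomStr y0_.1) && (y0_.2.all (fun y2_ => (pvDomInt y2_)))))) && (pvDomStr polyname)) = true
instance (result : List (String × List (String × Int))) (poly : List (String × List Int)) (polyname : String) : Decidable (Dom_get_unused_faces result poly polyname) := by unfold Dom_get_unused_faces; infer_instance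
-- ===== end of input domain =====

-- B collects a 'used' set once and returns a single bulk set difference, instead of A's
-- incremental try/except removal from the key set with an early exit: simpler decomposition.

-- ===== PORT A =====
-- inner loop: 'for face, orientation in res: try: faces.remove(face) except: pass'
def pvRemoveInner (faces : PySem.Set String) (res : List (String × Int)) : PySem.Set String :=
  res.foldl (fun fs p =>
    match PySem.Set.remove? fs p.1 with
    | some fs' => fs'
    | none => fs) faces

-- outer loop over result.values() with the early 'return faces' when faces is empty
def pvLoopA (faces : PySem.Set String) : List (List (String × Int)) → PySem.Set String
  | [] => faces
  | res :: rest =>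
    let faces' := pvRemoveInner faces res
    if faces' = [] then faces' else pvLoopA faces' rest

def get_unused_faces (result : List (String × List (String × Int))) (poly : List (String × List Int)) (polyname : String) : List String :=
  pvLoopA (PySem.Set.ofList (PySem.Dict.keys (PySem.Dict.mk poly)))
    (PySem.Dict.values (PySem.Dict.mk result))

-- ===== PORT B =====
def get_unused_faces_alt (result : List (String × List (String × Int))) (poly : List (String × List Int)) (polyname : String) : List String :=
  let used : PySem.Set String :=
    (PySem.Dict.values (PySem.Dict.mk result)).foldl
      (fun u res => res.foldl (fun u p => PySem.Set.add u p.1) u) PySem.Set.empty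
  PySem.Set.diff (PySem.Set.ofList (PySem.Dict.keys (PySem.Dict.mk poly))) used

-- ===== PRECONDITION & SPEC =====
def Spec_get_unused_faces (result : List (String × List (String × Int))) (poly : List (String × List Int)) (polyname : String) (out : List String) : Prop := out = get_unused_faces_alt result poly polyname
instance (result : List (String × List (String × Int))) (poly : List (String × List Int)) (polyname : String) (out : List String) : Decidable (Spec_get_unused_faces result poly polyname out) := by unfold Spec_get_unused_faces; infer_instance

-- ===== CLAIM (what is proved, stated in full; the proofs are below) =====
def Claim_equal_get_unused_faces : Prop := ∀ (result : List (String × List (String × Int))) (poly : List (String × List Int)) (polyname : String), Dom_get_unused_faces result poly polyname → Spec_get_unused_faces result poly polyname (get_unused_faces result poly polyname)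

-- ===== LEMMAS AND PROOFS =====

-- one 'try: faces.remove(face) except: pass' step is exactly set.discard
theorem pvRemoveStep (s : PySem.Set String) (x : String) :
    (match PySem.Set.remove? s x with
      | some fs' => fs'
      | none => s) = PySem.Set.discard s x := by
  by_cases h : x ∈ s
  · have hr : PySem.Set.remove? s x = some (PySem.Set.discard s x) := by
      simp [PySem.Set.remove?, h]
    rw [hr]
  · have hr : PySem.Set.remove? s x = none := by
      simp [PySem.Set.remove?, h]
    rw [hr]
    show s = List.filter (fun y => !(y == x)) s
    refine (List.filter_eq_self.mpr ?_).symm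
    intro y hy
    simp only [Bool.not_eq_eq_eq_not, Bool.not_true, beq_eq_false_iff_ne]
    exact fun e => h (e ▸ hy)

-- A's inner loop removes exactly the faces listed in res, i.e. filters by them.
theorem pvRemoveInner_eq_filter (res : List (String × Int)) (s : PySem.Set String) :
    pvRemoveInner s res = s.filter (fun y => !((res.map Prod.fst).contains y)) := by
  induction res generalizing s with
  | nil => simp [pvRemoveInner]
  | cons a res ih =>
    show pvRemoveInner (match PySem.Set.remove? s a.1 with
        | some fs' => fs'
        | none => s) res = _
    rw [pvRemoveStep, ih]
    show List.filter _ (List.filter (fun y => !(y == a.1)) s) = _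
    rw [List.filter_filter]
    apply List.filter_congr
    intro y _
    simp only [List.map_cons, List.contains_cons]
    cases h1 : (y == a.1) <;> cases h2 : (res.map Prod.fst).contains y <;> simp

-- A's outer loop (with its early exit) filters by all faces occurring in the value lists.
theorem pvLoopA_eq_filter (l : List (List (String × Int))) (s : PySem.Set String) :
    pvLoopA s l = s.filter (fun y => !((l.flatMap (fun res => res.map Prod.fst)).contains y)) := by
  induction l generalizing s with
  | nil => simp [pvLoopA]
  | cons res rest ih =>
    have hsplit : s.filter (fun y => !(((res :: rest).flatMap (fun r => r.map Prod.fst)).contains y))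
        = (s.filter (fun y => !((res.map Prod.fst).contains y))).filter
            (fun y => !((rest.flatMap (fun r => r.map Prod.fst)).contains y)) := by
      rw [List.filter_filter]
      apply List.filter_congr
      intro y _
      simp only [List.flatMap_cons, List.contains_append]
      cases h1 : (res.map Prod.fst).contains y <;>
        cases h2 : (rest.flatMap (fun r => r.map Prod.fst)).contains y <;> simp
    show (if pvRemoveInner s res = [] then pvRemoveInner s res else pvLoopA (pvRemoveInner s res) rest) = _
    rw [hsplit, ← pvRemoveInner_eq_filter]
    by_cases h : pvRemoveInner s res = []
    · rw [if_pos h, h]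
      rfl
    · rw [if_neg h, ih]

-- membership in B's accumulated 'used' set
theorem pvUsed_mem (l : List (List (String × Int))) (u : PySem.Set String) (y : String) :
    (y ∈ l.foldl (fun u res => res.foldl (fun u p => PySem.Set.add u p.1) u) u) ↔
      y ∈ u ∨ y ∈ l.flatMap (fun res => res.map Prod.fst) := by
  induction l generalizing u with
  | nil => simp
  | cons res rest ih =>
    simp only [List.foldl_cons, List.flatMap_cons, List.mem_append]
    rw [ih, ← PySem.Set.update_map_eq_foldl_add, PySem.Set.mem_update]
    tauto

theorem get_unused_faces_eq : ∀ (result : List (String × List (String × Int))) (poly : List (String × List Int)) (polyname : String),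
    get_unused_faces result poly polyname = get_unused_faces_alt result poly polyname := by
  intro result poly polyname
  unfold get_unused_faces get_unused_faces_alt
  rw [pvLoopA_eq_filter]
  show _ = List.filter _ _
  apply List.filter_congr
  intro y _
  have h := pvUsed_mem (PySem.Dict.values (PySem.Dict.mk result)) PySem.Set.empty y
  simp only [PySem.Set.empty, List.not_mem_nil, false_or] at h
  by_cases hy : y ∈ (PySem.Dict.values (PySem.Dict.mk result)).flatMap (fun res => res.map Prod.fst)
  · have h1 : ((PySem.Dict.values (PySem.Dict.mk result)).flatMap (fun res => res.map Prod.fst)).contains y = true := by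
      simpa using hy
    have h2 : PySem.Set.contains ((PySem.Dict.values (PySem.Dict.mk result)).foldl (fun u res => res.foldl (fun u p => PySem.Set.add u p.1) u) PySem.Set.empty) y = true :=
      (PySem.Set.contains_iff _ _).mpr (h.mpr hy)
    rw [h1, h2]
  · have h1 : ((PySem.Dict.values (PySem.Dict.mk result)).flatMap (fun res => res.map Prod.fst)).contains y = false := by
      simpa using hy
    have h2 : PySem.Set.contains ((PySem.Dict.values (PySem.Dict.mk result)).foldl (fun u res => res.foldl (fun u p => PySem.Set.add u p.1) u) PySem.Set.empty) y = false := by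
      rw [← Bool.not_eq_true]
      intro hc
      exact hy (h.mp ((PySem.Set.contains_iff _ _).mp hc))
    rw [h1, h2]

-- ===== VERDICT (by name: the statement is the Claim_ definition above) =====
theorem get_unused_faces_spec : Claim_equal_get_unused_faces := by
  intro result poly polyname _
  exact get_unused_faces_eq result poly polyname
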